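-- pv_equiv track=rewrite | github.com/Grihalkh/SelfStudy | Grocking algorithms/my own stuff/Sieve of Eratosthenes.py | clear_lst
-- ===== SOURCE A (Python) =====
-- def clear_lst(lst):
--     n = len(lst)
--     i = 0
--     while i < n:
--         if lst[i] is None:
--             del lst[i]
--             n -= 1
--         else:
--             i += 1
--     return lst
-- ===== SOURCE B (Python) =====
-- def clear_lst(lst):
--     # single-pass two-pointer compaction (mutates lst in place, like A)
--     w = 0
--     for x in lst:
--         if x is not None:
--             lst[w] = x
--             w += 1
--     del lst[w:]
--     return lst
-- ===== Notes on version B (the rewrite author's own statement) =====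
-- stated objective: faster
-- what changed: Replaces delete-as-you-scan (each del shifts the tail) with a single-pass write-cursor compaction followed by one tail truncation.
import Mathlib
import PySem

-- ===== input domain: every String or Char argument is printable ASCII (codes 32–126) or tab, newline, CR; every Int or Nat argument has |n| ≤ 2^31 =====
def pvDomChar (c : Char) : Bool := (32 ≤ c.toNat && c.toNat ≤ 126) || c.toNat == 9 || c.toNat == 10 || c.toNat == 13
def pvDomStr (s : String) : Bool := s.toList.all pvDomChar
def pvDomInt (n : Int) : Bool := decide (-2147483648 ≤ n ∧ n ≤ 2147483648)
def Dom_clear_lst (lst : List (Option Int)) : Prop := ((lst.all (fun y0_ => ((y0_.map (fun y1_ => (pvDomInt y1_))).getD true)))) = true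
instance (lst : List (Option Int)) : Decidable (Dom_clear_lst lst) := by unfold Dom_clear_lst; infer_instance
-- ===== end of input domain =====

-- B compacts with a write cursor in one pass instead of A's delete-as-you-scan; proof is about the RETURN value (both Pythons mutate lst in place).

-- ===== PORT A =====
-- A's while loop: index i scans; a None at i is deleted (shifting the tail), otherwise i advances.
def clearLstLoopA (lst : List (Option Int)) (i : Nat) : List (Option Int) :=
  if h : i < lst.length then
    if lst[i] = none then clearLstLoopA (lst.eraseIdx i) i
    else clearLstLoopA lst (i + 1)
  else lst
termination_by lst.length - i
decreasing_by
  · simp [List.length_eraseIdx, h]; omega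
  · omega

def clear_lst (lst : List (Option Int)) : List Int :=
  -- the returned list contains no `none`; extract the Ints (type conversion only)
  (clearLstLoopA lst 0).filterMap id

-- ===== PORT B =====
-- B's single pass: write each non-None element at the cursor (appending to the compacted prefix).
def clear_lst_alt (lst : List (Option Int)) : List Int :=
  lst.foldl (fun acc x => match x with | some v => acc ++ [v] | none => acc) []

-- ===== PRECONDITION & SPEC =====
def Spec_clear_lst (lst : List (Option Int)) (out : List Int) : Prop := out = clear_lst_alt lst
instance (lst : List (Option Int)) (out : List Int) : Decidable (Spec_clear_lst lst out) := by unfold Spec_clear_lst; infer_instance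

-- ===== CLAIM (what is proved, stated in full; the proofs are below) =====
def Claim_equal_clear_lst : Prop := ∀ (lst : List (Option Int)), Dom_clear_lst lst → Spec_clear_lst lst (clear_lst lst)

-- ===== LEMMAS AND PROOFS =====

-- erasing a `none` element does not change the extracted Ints
theorem filterMap_eraseIdx_none (lst : List (Option Int)) (i : Nat)
    (h : i < lst.length) (hn : lst[i] = none) :
    (lst.eraseIdx i).filterMap id = lst.filterMap id := by
  induction lst generalizing i with
  | nil => simp at h
  | cons a t ih =>
    cases i with
    | zero => simp_all
    | succ j =>
      simp only [List.eraseIdx_cons_succ, List.filterMap_cons]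
      rw [ih j (by simpa using h) (by simpa using hn)]

theorem clearLstLoopA_filterMap (lst : List (Option Int)) (i : Nat) :
    (clearLstLoopA lst i).filterMap id = lst.filterMap id := by
  induction lst, i using clearLstLoopA.induct with
  | case1 lst i h hn ih =>
    rw [clearLstLoopA]
    simp only [h, dif_pos, hn, if_pos]
    rw [ih, filterMap_eraseIdx_none lst i h hn]
  | case2 lst i h hn ih =>
    rw [clearLstLoopA]
    simp only [h, dif_pos, hn]
    exact ih
  | case3 lst i h =>
    rw [clearLstLoopA]
    simp [h]

theorem foldl_append_filterMap (lst : List (Option Int)) (acc : List Int) :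
    lst.foldl (fun acc x => match x with | some v => acc ++ [v] | none => acc) acc
      = acc ++ lst.filterMap id := by
  induction lst generalizing acc with
  | nil => simp
  | cons a t ih =>
    cases a <;> simp [List.foldl_cons, ih]

-- ===== VERDICT (by name: the statement is the Claim_ definition above) =====
theorem clear_lst_spec : Claim_equal_clear_lst := by
  intro lst _
  unfold Spec_clear_lst clear_lst clear_lst_alt
  rw [clearLstLoopA_filterMap, foldl_append_filterMap]
  simp
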